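-- pv_equiv track=rewrite | github.com/Herdran/wiet | WDI/WDI_6/16.py | wyraz
-- ===== SOURCE A (Python) =====
-- def weight(word):
--     sum_ = 0
--     for i in range(len(word)):
--         sum_ += ord(word[i])
--     return sum_
--
-- def vovels_check(word1, word2):
--     w1, w2 = 0, 0
--     for i in range(len(word1)):
--         if word1[i] in vowel:
--             w1 += 1
--     for i in range(len(word2)):
--         if word2[i] in vowel:
--             w2 += 1
--     return w1 == w2
--
-- def wyraz(s1, s2):
--     if weight(s1) >= weight(s2):
--         return False
--     else:
--         for i in range(len(s2)):
--             word = s2[:i] + s2[i+1:]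
--             if weight(word) > weight(s1):
--                 return wyraz(s1, word)
--             if weight(word) == weight(s1) and vovels_check(s1, word):
--                 return True
--
-- vowel = "aeiou"
-- ===== SOURCE B (Python) =====
-- VOWELS = set("aeiou")
--
-- def wyraz(s1, s2):
--     w1 = sum(map(ord, s1))
--     w = sum(map(ord, s2))
--     if w1 >= w:
--         return False
--     v1 = sum(c in VOWELS for c in s1)
--     cur = list(s2)
--     v = sum(c in VOWELS for c in cur)
--     while True:
--         hit = None
--         for i, c in enumerate(cur):
--             nw = w - ord(c)
--             nv = v - (c in VOWELS)
--             if nw > w1: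
--                 hit = (i, nw, nv)
--                 break
--             if nw == w1 and nv == v1:
--                 return True
--         if hit is None:
--             return None
--         i, w, v = hit
--         del cur[i]
-- ===== Notes on version B (the rewrite author's own statement) =====
-- stated objective: faster
-- what changed: B keeps the current candidate as a char list with its weight and vowel count maintained incrementally (subtracting the removed char) in an iterative while-loop, instead of A's recursion that re-slices the string and recomputes weight/vowel counts from scratch for every candidate at every level; intended as faster, measured ~2.6x at the largest size both finished (A timed out on some inputs where B answered).
import Mathlib
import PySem

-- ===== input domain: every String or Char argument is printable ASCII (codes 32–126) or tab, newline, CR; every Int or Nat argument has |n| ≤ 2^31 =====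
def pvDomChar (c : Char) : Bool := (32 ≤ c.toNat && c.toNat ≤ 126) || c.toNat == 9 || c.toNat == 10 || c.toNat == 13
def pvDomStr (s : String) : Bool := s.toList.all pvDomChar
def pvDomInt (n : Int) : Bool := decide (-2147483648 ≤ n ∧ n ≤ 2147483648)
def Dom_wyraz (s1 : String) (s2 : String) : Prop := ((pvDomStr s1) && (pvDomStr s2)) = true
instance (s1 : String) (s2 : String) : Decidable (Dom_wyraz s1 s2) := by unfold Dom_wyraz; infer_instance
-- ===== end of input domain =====

-- B computes each candidate's weight/vowel count incrementally (subtracting the removed char) over a char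
-- list instead of rebuilding and rescanning sliced strings at every level; intended as faster (O(n^2) work
-- per deletion chain vs A's O(n^3)); a timing run measured B ~2.6x at the largest size both finished,
-- with A timing out on some inputs where B answered.

-- ===== PORT A =====
-- 'c in vowel' for the single char word[i], vowel = "aeiou"
def pvVowel (c : Char) : Bool := ['a', 'e', 'i', 'o', 'u'].contains c

-- weight(word): for i in range(len(word)): sum_ += ord(word[i])
def weightA (word : List Char) : Int :=
  (PySem.List.pyRange 0 (PySem.List.len word) 1).foldl
    (fun s i => s + ((PySem.List.pyGetD word i ' ').toNat : Int)) 0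

-- one counting loop of vovels_check
def vcountA (word : List Char) : Int :=
  (PySem.List.pyRange 0 (PySem.List.len word) 1).foldl
    (fun n i => if pvVowel (PySem.List.pyGetD word i ' ') then n + 1 else n) 0

def vovelsCheck (word1 word2 : List Char) : Bool := vcountA word1 == vcountA word2

-- the body of A's 'for i in range(len(s2))' loop: first index that triggers a return;
-- .inl word = 'return wyraz(s1, word)' with that word, .inr () = 'return True', none = fall through (None)
def loopA (s1 s2 : List Char) (idxs : List Int) : Option (List Char ⊕ Unit) :=
  match idxs with
  | [] => none
  | i :: rest =>
    let word := PySem.List.slice s2 none (some i) ++ PySem.List.slice s2 (some (i + 1)) none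
    if weightA word > weightA s1 then some (.inl word)
    else if weightA word = weightA s1 ∧ vovelsCheck s1 word then some (.inr ())
    else loopA s1 s2 rest

-- termination fact the recursion of wyrazA cites: the word A recurses on is one char shorter
theorem loopA_inl_length (s1 s2 : List Char) :
    ∀ (idxs : List Int) (word : List Char),
      (∀ i ∈ idxs, 0 ≤ i ∧ i < (s2.length : Int)) →
      loopA s1 s2 idxs = some (.inl word) → word.length < s2.length := by
  intro idxs
  induction idxs with
  | nil => intro word _ h; simp [loopA] at h
  | cons i rest ih =>
    intro word hmem h
    obtain ⟨h0, hlt⟩ := hmem i (by simp)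
    simp only [loopA] at h
    split_ifs at h with h1 h2
    · injection h with h; injection h with h
      obtain ⟨k, rfl⟩ : ∃ k : Nat, i = (k : Int) := ⟨i.toNat, (Int.toNat_of_nonneg h0).symm⟩
      have : ((k : Int) + 1) = ((k + 1 : Nat) : Int) := by push_cast; ring
      rw [this, PySem.List.slice_to_natCast, PySem.List.slice_from_natCast] at h
      have hk : k < s2.length := by exact_mod_cast hlt
      subst h; simp [List.length_take, List.length_drop]; omega
    · exact absurd h (by simp)
    · exact ih word (fun j hj => hmem j (by simp [hj])) h

def wyrazA (s1 s2 : List Char) : Option Bool :=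
  if weightA s1 ≥ weightA s2 then some false
  else
    match h : loopA s1 s2 (PySem.List.pyRange 0 (PySem.List.len s2) 1) with
    | some (.inl word) => wyrazA s1 word
    | some (.inr _) => some true
    | none => none
termination_by s2.length
decreasing_by
  exact loopA_inl_length s1 s2 _ word
    (fun i hi => by
      have := (PySem.List.mem_pyRange_one).mp hi
      simp [PySem.List.len_eq] at this; exact ⟨this.1, by exact_mod_cast this.2⟩) h

def wyraz (s1 : String) (s2 : String) : Option Bool := wyrazA s1.toList s2.toList

-- ===== PORT B =====
-- sum(map(ord, s))
def ordSum (l : List Char) : Int := (l.map (fun c => (c.toNat : Int))).sum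

-- sum(c in VOWELS for c in s)
def vSum (l : List Char) : Int := (l.map (fun c => if pvVowel c then (1 : Int) else 0)).sum

-- B's inner scan: first index whose removal keeps the weight above w1 (remove it: .inl (new list, new
-- weight, new vowel count)) or hits w1 with matching vowels (.inr = return True); none = no hit.
-- pre holds the already-scanned prefix reversed, so the result list is built without re-slicing.
def scanB (w1 v1 : Int) (pre cur : List Char) (w v : Int) :
    Option ((List Char × Int × Int) ⊕ Unit) :=
  match cur with
  | [] => none
  | c :: rest =>
    let nw := w - (c.toNat : Int)
    let nv := v - (if pvVowel c then 1 else 0)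
    if nw > w1 then some (.inl (pre.reverse ++ rest, nw, nv))
    else if nw = w1 ∧ nv = v1 then some (.inr ())
    else scanB w1 v1 (c :: pre) rest w v

-- termination fact loopB cites: a removal shortens the list by exactly one
theorem scanB_inl_length (w1 v1 : Int) :
    ∀ (cur pre : List Char) (w v : Int) (res : List Char × Int × Int),
      scanB w1 v1 pre cur w v = some (.inl res) → res.1.length + 1 = pre.length + cur.length := by
  intro cur
  induction cur with
  | nil => intro pre w v res h; simp [scanB] at h
  | cons c rest ih =>
    intro pre w v res h
    simp only [scanB] at h
    by_cases h1 : w - (c.toNat : Int) > w1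
    · rw [if_pos h1] at h
      injection h with h; injection h with h
      subst h; simp; omega
    · rw [if_neg h1] at h
      by_cases h2 : w - (c.toNat : Int) = w1 ∧ v - (if pvVowel c then (1 : Int) else 0) = v1
      · rw [if_pos h2] at h; exact absurd h (by simp)
      · rw [if_neg h2] at h
        have := ih (c :: pre) w v res h; simp at this ⊢; omega

-- B's 'while True' loop
def loopB (w1 v1 : Int) (cur : List Char) (w v : Int) : Option Bool :=
  match h : scanB w1 v1 [] cur w v with
  | some (.inl (next, nw, nv)) => loopB w1 v1 next nw nv
  | some (.inr _) => some true
  | none => none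
termination_by cur.length
decreasing_by
  have := scanB_inl_length w1 v1 cur [] w v (next, nw, nv) h
  simp at this; omega

def wyraz_alt (s1 : String) (s2 : String) : Option Bool :=
  let w1 := ordSum s1.toList
  let w := ordSum s2.toList
  if w1 ≥ w then some false
  else
    let v1 := vSum s1.toList
    let cur := s2.toList
    let v := vSum cur
    loopB w1 v1 cur w v

-- ===== PRECONDITION & SPEC =====
def Spec_wyraz (s1 : String) (s2 : String) (out : Option Bool) : Prop := out = wyraz_alt s1 s2
instance (s1 : String) (s2 : String) (out : Option Bool) : Decidable (Spec_wyraz s1 s2 out) := by unfold Spec_wyraz; infer_instance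

-- ===== CLAIM (what is proved, stated in full; the proofs are below) =====
def Claim_equal_wyraz : Prop := ∀ (s1 : String) (s2 : String), Dom_wyraz s1 s2 → Spec_wyraz s1 s2 (wyraz s1 s2)

-- ===== LEMMAS AND PROOFS =====

theorem weightA_eq (l : List Char) : weightA l = ordSum l := by
  unfold weightA ordSum
  rw [PySem.List.foldl_pyRange_zero_pyGetD l ' ' (fun s c => s + (c.toNat : Int)) 0,
      PySem.List.foldl_add]
  simp

theorem vSum_eq (l : List Char) : vSum l = (l.countP pvVowel : Int) := by
  unfold vSum
  rw [PySem.List.sum_map_ite_one_zero]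

theorem vovelsCheck_eq (a b : List Char) : vovelsCheck a b = decide (vSum a = vSum b) := by
  unfold vovelsCheck vcountA
  rw [PySem.List.foldl_pyRange_zero_pyGetD a ' ' (fun n c => if pvVowel c then n + 1 else n) 0,
      PySem.List.foldl_pyRange_zero_pyGetD b ' ' (fun n c => if pvVowel c then n + 1 else n) 0,
      PySem.List.foldl_if_add_one, PySem.List.foldl_if_add_one, vSum_eq, vSum_eq]
  simp only [zero_add]
  by_cases h : List.countP pvVowel a = List.countP pvVowel b <;> simp [h]

theorem ordSum_nonneg (l : List Char) : 0 ≤ ordSum l := by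
  unfold ordSum
  apply List.sum_nonneg
  intro x hx
  simp only [List.mem_map] at hx
  obtain ⟨c, _, rfl⟩ := hx
  positivity

theorem ordSum_append (a b : List Char) : ordSum (a ++ b) = ordSum a + ordSum b := by
  simp [ordSum]

theorem vSum_append (a b : List Char) : vSum (a ++ b) = vSum a + vSum b := by
  simp [vSum]

theorem ordSum_cons (c : Char) (l : List Char) : ordSum (c :: l) = (c.toNat : Int) + ordSum l := by
  simp [ordSum]

theorem vSum_cons (c : Char) (l : List Char) :
    vSum (c :: l) = (if pvVowel c then (1 : Int) else 0) + vSum l := by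
  simp [vSum]

-- invariant of scanB: if w/v are the weight/vowel-sum of the whole list, an .inl result carries the
-- weight/vowel-sum of the shortened list, and that weight is above w1
theorem scanB_inl_spec (w1 v1 : Int) :
    ∀ (cur pre : List Char) (w v : Int) (next : List Char) (nw nv : Int),
      w = ordSum (pre.reverse ++ cur) → v = vSum (pre.reverse ++ cur) →
      scanB w1 v1 pre cur w v = some (.inl (next, nw, nv)) →
      nw = ordSum next ∧ nv = vSum next ∧ w1 < nw := by
  intro cur
  induction cur with
  | nil => intro pre w v next nw nv _ _ h; simp [scanB] at h
  | cons c rest ih =>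
    intro pre w v next nw nv hw hv h
    simp only [scanB] at h
    by_cases h1 : w - (c.toNat : Int) > w1
    · rw [if_pos h1] at h
      injection h with h; injection h with h
      simp only [Prod.mk.injEq] at h
      obtain ⟨ha, hb, hc⟩ := h
      subst ha; subst hb; subst hc
      refine ⟨?_, ?_, h1⟩
      · rw [hw, ordSum_append, ordSum_cons, ordSum_append]; ring
      · rw [hv, vSum_append, vSum_cons, vSum_append]; ring
    · rw [if_neg h1] at h
      by_cases h2 : w - (c.toNat : Int) = w1 ∧ v - (if pvVowel c then (1 : Int) else 0) = v1
      · rw [if_pos h2] at h; exact absurd h (by simp)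
      · rw [if_neg h2] at h
        exact ih (c :: pre) w v next nw nv
          (by rw [hw]; simp [ordSum, add_assoc, add_comm])
          (by rw [hv]; simp [vSum, add_assoc, add_comm]) h

-- strips B's incremental counters so A's loop result and B's scan result can be compared directly
def stripB : Option ((List Char × Int × Int) ⊕ Unit) → Option (List Char ⊕ Unit)
  | none => none
  | some (.inr _) => some (.inr ())
  | some (.inl (next, _, _)) => some (.inl next)

-- A's loop from index k onward computes the same decision as B's scan with the first k chars consumed
theorem corr (s1 s2 : List Char) :
    ∀ (m k : Nat), k + m = s2.length →
      loopA s1 s2 (PySem.List.pyRange (k : Int) (PySem.List.len s2) 1) =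
        stripB (scanB (ordSum s1) (vSum s1) ((s2.take k).reverse) (s2.drop k)
          (ordSum s2) (vSum s2)) := by
  intro m
  induction m with
  | zero =>
    intro k hk
    rw [PySem.List.pyRange_one_eq_nil (by simp [PySem.List.len_eq]; omega)]
    rw [List.drop_eq_nil_of_le (by omega)]
    simp [loopA, scanB, stripB]
  | succ m ih =>
    intro k hk
    have hklt : k < s2.length := by omega
    rw [PySem.List.pyRange_one_cons (by simp [PySem.List.len_eq]; exact_mod_cast hklt)]
    have hdrop : s2.drop k = s2[k] :: s2.drop (k + 1) := List.drop_eq_getElem_cons hklt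
    -- word built by A at index k equals take k ++ drop (k+1)
    have hword : PySem.List.slice s2 none (some (k : Int)) ++
        PySem.List.slice s2 (some ((k : Int) + 1)) none = s2.take k ++ s2.drop (k + 1) := by
      have : ((k : Int) + 1) = ((k + 1 : Nat) : Int) := by push_cast; ring
      rw [this, PySem.List.slice_to_natCast, PySem.List.slice_from_natCast]
    -- incremental counters equal the recomputed ones
    have e1 : ordSum s2 = ordSum (s2.take k) + ordSum (s2.drop k) := by
      conv_lhs => rw [← List.take_append_drop k s2]
      rw [ordSum_append]
    have e2 : ordSum (s2.drop k) = (s2[k].toNat : Int) + ordSum (s2.drop (k + 1)) := by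
      rw [hdrop, ordSum_cons]
    have f1 : vSum s2 = vSum (s2.take k) + vSum (s2.drop k) := by
      conv_lhs => rw [← List.take_append_drop k s2]
      rw [vSum_append]
    have f2 : vSum (s2.drop k) = (if pvVowel s2[k] then (1 : Int) else 0) + vSum (s2.drop (k + 1)) := by
      rw [hdrop, vSum_cons]
    have hw : ordSum s2 - (s2[k].toNat : Int) = ordSum (s2.take k ++ s2.drop (k + 1)) := by
      rw [ordSum_append]; rw [e2] at e1; linarith
    have hv : vSum s2 - (if pvVowel s2[k] then (1 : Int) else 0) =
        vSum (s2.take k ++ s2.drop (k + 1)) := by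
      rw [vSum_append]; rw [f2] at f1; linarith
    simp only [loopA, hword]
    rw [hdrop]
    simp only [scanB]
    simp only [weightA_eq, vovelsCheck_eq, decide_eq_true_eq]
    rw [hw, hv]
    by_cases hgt : ordSum (s2.take k ++ s2.drop (k + 1)) > ordSum s1
    · rw [if_pos hgt, if_pos hgt]
      simp [stripB]
    · rw [if_neg hgt, if_neg hgt]
      by_cases heq : ordSum (s2.take k ++ s2.drop (k + 1)) = ordSum s1 ∧
          vSum s1 = vSum (s2.take k ++ s2.drop (k + 1))
      · rw [if_pos heq, if_pos ⟨heq.1, heq.2.symm⟩]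
        simp [stripB]
      · rw [if_neg heq, if_neg (fun hc => heq ⟨hc.1, hc.2.symm⟩)]
        have hpre : (s2.take (k + 1)).reverse = s2[k] :: (s2.take k).reverse := by
          rw [List.take_add_one, List.getElem?_eq_getElem hklt]
          simp
        have hrec := ih (k + 1) (by omega)
        rw [hpre] at hrec
        rw [show ((k : Int) + 1) = ((k + 1 : Nat) : Int) by push_cast; ring]
        exact hrec

theorem main_lem (s1 : List Char) :
    ∀ (n : Nat) (s2 : List Char), s2.length ≤ n →
      wyrazA s1 s2 =
        if ordSum s1 ≥ ordSum s2 then some false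
        else loopB (ordSum s1) (vSum s1) s2 (ordSum s2) (vSum s2) := by
  intro n
  induction n with
  | zero =>
    intro s2 hlen
    have hnil : s2 = [] := List.eq_nil_of_length_eq_zero (by omega)
    subst hnil
    rw [wyrazA]
    have h0 : 0 ≤ ordSum s1 := ordSum_nonneg s1
    rw [if_pos (by rw [weightA_eq, weightA_eq]; simp [ordSum]; exact h0),
        if_pos (by simp [ordSum]; exact h0)]
  | succ n ih =>
    intro s2 hlen
    rw [wyrazA]
    simp only [weightA_eq]
    by_cases hge : ordSum s1 ≥ ordSum s2
    · rw [if_pos hge, if_pos hge]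
    · rw [if_neg hge, if_neg hge]
      have hc := corr s1 s2 s2.length 0 (by omega)
      simp only [Nat.cast_zero, List.take_zero, List.reverse_nil, List.drop_zero] at hc
      rw [loopB]
      cases hs : scanB (ordSum s1) (vSum s1) [] s2 (ordSum s2) (vSum s2) with
      | none =>
        rw [hs] at hc; simp only [stripB] at hc
        split
        · rename_i hA; rw [hc] at hA; simp at hA
        · rename_i hA; rw [hc] at hA; simp at hA
        · rfl
      | some r =>
        cases r with
        | inr u =>
          rw [hs] at hc; simp only [stripB] at hc
          split
          · rename_i hA; rw [hc] at hA; simp at hA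
          · rfl
          · rename_i hA; rw [hc] at hA; simp at hA
        | inl t =>
          obtain ⟨next, nw, nv⟩ := t
          rw [hs] at hc; simp only [stripB] at hc
          have hstep : (match h : loopA s1 s2 (PySem.List.pyRange 0 (PySem.List.len s2) 1) with
              | some (.inl word) => wyrazA s1 word
              | some (.inr _) => some true
              | none => (none : Option Bool)) = wyrazA s1 next := by
            split
            · rename_i hA; rw [hc] at hA; simp at hA; rw [hA]
            · rename_i hA; rw [hc] at hA; simp at hA
            · rename_i hA; rw [hc] at hA; simp at hA
          rw [hstep]
          obtain ⟨hnw, hnv, hgtB⟩ := scanB_inl_spec (ordSum s1) (vSum s1) s2 [] (ordSum s2)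
            (vSum s2) next nw nv (by simp) (by simp) hs
          have hlen' : next.length < s2.length := by
            have := scanB_inl_length (ordSum s1) (vSum s1) s2 [] (ordSum s2) (vSum s2)
              (next, nw, nv) hs
            simp at this; omega
          rw [ih next (by omega), if_neg (by omega), hnw, hnv]

-- ===== VERDICT (by name: the statement is the Claim_ definition above) =====
theorem wyraz_spec : Claim_equal_wyraz := by
  intro s1 s2 _
  unfold Spec_wyraz wyraz wyraz_alt
  exact main_lem s1.toList s2.toList.length s2.toList (le_refl _)
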